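-- pv_equiv track=rewrite | github.com/pypi-data/pypi-mirror-254 | packages/PyEDCR/PyEDCR-0.1.30.tar.gz/PyEDCR-0.1.30/src/PyEDCR/EDCR_pipeline.py | generate_chart
-- ===== SOURCE A (Python) =====
-- def generate_chart(n_classes: int,
--                    charts: list) -> list:
--     all_charts = [[] for _ in range(n_classes)]
--
--     for data in charts:
--         for count, jj in enumerate(all_charts):
--             # pred, corr, tp, fp, cond1, cond2 ... condn
--             each_items = []
--             for d in data[:2]:
--                 if d == count:
--                     each_items.append(1)
--                 else:
--                     each_items.append(0)
--
--             if each_items[0] == 1 and each_items[1] == 1: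
--                 each_items.append(1)
--             else:
--                 each_items.append(0)
--             if each_items[0] == 1 and each_items[1] == 0:
--                 each_items.append(1)
--             else:
--                 each_items.append(0)
--
--             each_items.extend(data[2:])
--             jj.append(each_items)
--
--     return all_charts
-- ===== SOURCE B (Python) =====
-- def generate_chart(n_classes: int,
--                    charts: list) -> list:
--     # sparse fix-up: start every (class, row) cell as the all-zero row
--     # [0,0,0,0]+tail, then patch only the (at most two) classes named by
--     # each data row: pred/tp/fp at class data[0], corr at class data[1],
--     # applied only when that class actually exists (0 <= value < n_classes),
--     # which is exactly when A's '== count' test fires.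
--     all_charts = [[[0, 0, 0, 0] + list(data[2:]) for data in charts]
--                   for _ in range(n_classes)]
--     if n_classes <= 0:
--         return all_charts      # no classes: nothing to patch
--     for i, data in enumerate(charts):
--         d0, d1 = data[0], data[1]
--         if 0 <= d0 < n_classes:
--             row = all_charts[d0][i]
--             row[0] = 1
--             if d0 == d1:
--                 row[2] = 1
--             else:
--                 row[3] = 1
--         if 0 <= d1 < n_classes:
--             all_charts[d1][i][1] = 1
--     return all_charts
-- ===== Notes on version B (the rewrite author's own statement) =====
-- stated objective: alternative
-- what changed: B replaces A's dense per-(row,class) comparison loop by a sparse fix-up: it pre-fills every cell with the all-zero row [0,0,0,0]+tail and then, per data row, patches only the at-most-two classes named by data[0] (pred/tp/fp) and data[1] (corr), guarded by a range check instead of n_classes equality tests.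
-- outside the precondition, e.g. on generate_chart(1, [[5]]): A returns [[[0, 0, 0]]], B raises IndexError
import Mathlib
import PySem

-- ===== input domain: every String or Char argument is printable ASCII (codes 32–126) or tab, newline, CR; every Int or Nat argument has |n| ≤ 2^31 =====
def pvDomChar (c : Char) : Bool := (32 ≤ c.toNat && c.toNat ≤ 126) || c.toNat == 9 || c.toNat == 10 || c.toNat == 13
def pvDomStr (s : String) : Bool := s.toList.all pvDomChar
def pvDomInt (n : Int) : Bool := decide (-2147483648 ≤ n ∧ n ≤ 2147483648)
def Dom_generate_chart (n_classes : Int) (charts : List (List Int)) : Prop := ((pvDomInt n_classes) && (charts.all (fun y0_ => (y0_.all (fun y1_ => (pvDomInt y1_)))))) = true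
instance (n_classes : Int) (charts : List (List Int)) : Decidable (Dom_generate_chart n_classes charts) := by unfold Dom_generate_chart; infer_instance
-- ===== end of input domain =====

set_option maxRecDepth 8000
set_option maxHeartbeats 1000000


-- B replaces A's dense per-(row,class) comparison loop by a sparse fix-up: pre-fill every
-- cell with the all-zero row and patch only the classes named by data[0]/data[1]; alternative, not faster.

-- ===== PORT A =====
-- one body of A's inner 'for count, jj in enumerate(all_charts)' loop: the row appended to jj
-- (each_items[0]/each_items[1] are ported with pyGetD; in range under Pre_)
def pvRowA (count : Int) (data : List Int) : List Int :=
  let e := (PySem.List.slice data none (some 2)).map (fun d => if d = count then (1:Int) else 0)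
  let e := e ++ [if PySem.List.pyGetD e 0 0 = 1 ∧ PySem.List.pyGetD e 1 0 = 1 then (1:Int) else 0]
  let e := e ++ [if PySem.List.pyGetD e 0 0 = 1 ∧ PySem.List.pyGetD e 1 0 = 0 then (1:Int) else 0]
  e ++ PySem.List.slice data (some 2) none

def generate_chart (n_classes : Int) (charts : List (List Int)) : List (List (List Int)) :=
  let all_charts : List (List (List Int)) := (PySem.List.pyRange 0 n_classes 1).map (fun _ => [])
  charts.foldl (fun acc data =>
    (PySem.List.enumerate acc).map (fun p => p.2 ++ [pvRowA p.1 data])) all_charts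

-- ===== PORT B =====
-- the all-zero template row [0,0,0,0] + data[2:]
def pvZeroRow (data : List Int) : List Int :=
  [0, 0, 0, 0] ++ PySem.List.slice data (some 2) none

-- one body of B's patch loop 'for i, data in enumerate(charts)'
-- (data[0]/data[1] are ported with pyGetD; in range under Pre_)
def pvStepB (n : Int) (acc : List (List (List Int))) (p : Int × List Int) : List (List (List Int)) :=
  let d0 := PySem.List.pyGetD p.2 0 0
  let d1 := PySem.List.pyGetD p.2 1 0
  let acc1 := if 0 ≤ d0 ∧ d0 < n then
      acc.modify d0.toNat (fun ch => ch.modify p.1.toNat (fun row =>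
        let row := row.set 0 1
        if d0 = d1 then row.set 2 1 else row.set 3 1))
    else acc
  if 0 ≤ d1 ∧ d1 < n then
    acc1.modify d1.toNat (fun ch => ch.modify p.1.toNat (fun row => row.set 1 1))
  else acc1

def generate_chart_alt (n_classes : Int) (charts : List (List Int)) : List (List (List Int)) :=
  let all_charts : List (List (List Int)) :=
    (PySem.List.pyRange 0 n_classes 1).map (fun _ => charts.map pvZeroRow)
  if n_classes ≤ 0 then all_charts
  else (PySem.List.enumerate charts 0).foldl (pvStepB n_classes) all_charts

-- ===== PRECONDITION & SPEC =====
-- Pre_ excludes (when some class exists) charts containing a row shorter than 2 entries: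
-- B raises IndexError there (data[0]/data[1]), and A raises too except for 1-element rows
-- matching no class, where its 3-element result is not a chart row of the stated shape.
def Pre_generate_chart (n_classes : Int) (charts : List (List Int)) : Prop :=
  0 < n_classes → ∀ data ∈ charts, 2 ≤ data.length
instance (n_classes : Int) (charts : List (List Int)) : Decidable (Pre_generate_chart n_classes charts) := by
  unfold Pre_generate_chart; infer_instance

def pvWitness_generate_chart : Int × List (List Int) := (2, [[1,0,7,8],[0,1]])

def Spec_generate_chart (n_classes : Int) (charts : List (List Int)) (out : List (List (List Int))) : Prop := out = generate_chart_alt n_classes charts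
instance (n_classes : Int) (charts : List (List Int)) (out : List (List (List Int))) : Decidable (Spec_generate_chart n_classes charts out) := by unfold Spec_generate_chart; infer_instance

-- ===== CLAIM (what is proved, stated in full; the proofs are below) =====
def Claim_equal_generate_chart : Prop := ∀ (n_classes : Int) (charts : List (List Int)), Dom_generate_chart n_classes charts → Pre_generate_chart n_classes charts → Spec_generate_chart n_classes charts (generate_chart n_classes charts)

-- ===== LEMMAS AND PROOFS =====

-- modifying the element sitting right after a known prefix
theorem modify_append_cons {α : Type} (l1 l2 : List α) (x : α) (f : α → α) :
    (l1 ++ x :: l2).modify l1.length f = l1 ++ f x :: l2 := by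
  induction l1 with
  | nil => simp [List.modify]
  | cons a t ih => simpa [List.modify] using ih

-- modifying index k of a list mapped over range(0, n) patches exactly class k
theorem modify_map_range (n : Int) (F : Int → List (List Int))
    (f : List (List Int) → List (List Int)) (k : Nat) (hk : (k : Int) < n) :
    ((PySem.List.pyRange 0 n 1).map F).modify k f
      = (PySem.List.pyRange 0 n 1).map (fun c => if c = (k : Int) then f (F c) else F c) := by
  apply List.ext_getElem
  · simp
  · intro j h1 h2
    have hj : j < (PySem.List.pyRange 0 n 1).length := by simp at h2 ⊢; omega
    have hjr : (PySem.List.pyRange 0 n 1)[j] = (j : Int) := by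
      rw [PySem.List.getElem_pyRange_one]; ring
    rw [List.getElem_modify]
    by_cases hjk : j = k
    · subst hjk
      simp [hjr]
    · have hkj : ¬ k = j := fun h => hjk h.symm
      have hji : ¬ ((j : Int) = (k : Int)) := by exact_mod_cast hjk
      simp [hkj, hjr, hji]

-- explicit form of A's row for a row of length ≥ 2
theorem rowA_explicit (c d0 d1 : Int) (t : List Int) :
    pvRowA c (d0 :: d1 :: t)
      = (if c = d0 then (if c = d1 then [1,1,1,0] else [1,0,0,1])
         else (if c = d1 then [0,1,0,0] else [0,0,0,0])) ++ t := by
  have hs1 : PySem.List.slice (d0 :: d1 :: t) none (some 2) = [d0, d1] := by simp [pysem]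
  have hs2 : PySem.List.slice (d0 :: d1 :: t) (some 2) none = t := by simp [pysem]
  simp only [pvRowA, hs1, hs2, List.map_cons, List.map_nil]
  by_cases h0 : d0 = c <;> by_cases h1 : d1 = c
  · subst h0 h1
    simp [PySem.List.pyGetD, PySem.List.pyGet?, PySem.List.pyIdx?]
  · subst h0
    simp [h1, Ne.symm h1, PySem.List.pyGetD, PySem.List.pyGet?, PySem.List.pyIdx?]
  · subst h1
    simp [h0, Ne.symm h0, PySem.List.pyGetD, PySem.List.pyGet?, PySem.List.pyIdx?]
  · simp [h0, h1, Ne.symm h0, Ne.symm h1, PySem.List.pyGetD, PySem.List.pyGet?, PySem.List.pyIdx?]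

-- one patch step turns row s's zero template into A's row, for every class at once
theorem stepB_eq (n : Int) (s : Nat) (pre tail : Int → List (List Int))
    (hpre : ∀ c, (pre c).length = s) (d0 d1 : Int) (t : List Int) :
    pvStepB n ((PySem.List.pyRange 0 n 1).map
        (fun c => pre c ++ pvZeroRow (d0 :: d1 :: t) :: tail c)) ((s : Int), d0 :: d1 :: t)
      = (PySem.List.pyRange 0 n 1).map
        (fun c => pre c ++ pvRowA c (d0 :: d1 :: t) :: tail c) := by
  have hz : pvZeroRow (d0 :: d1 :: t) = [0,0,0,0] ++ t := by simp [pvZeroRow, pysem]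
  have hget0 : PySem.List.pyGetD (d0 :: d1 :: t) 0 0 = d0 := by simp [pysem]
  have hget1 : PySem.List.pyGetD (d0 :: d1 :: t) 1 0 = d1 := by simp [pysem]
  have hsn : ((s : Int)).toNat = s := by simp
  -- the inner chart modify always hits position s
  have hmod : ∀ (c : Int) (f : List Int → List Int) (row : List Int),
      (pre c ++ row :: tail c).modify s f = pre c ++ f row :: tail c := by
    intro c f row
    have := modify_append_cons (pre c) (tail c) row f
    rwa [hpre c] at this
  simp only [pvStepB, hget0, hget1, hsn]
  by_cases h0 : 0 ≤ d0 ∧ d0 < n <;> by_cases h1 : 0 ≤ d1 ∧ d1 < n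
  · -- both classes exist
    have hk0 : ((d0.toNat : Nat) : Int) < n := by omega
    have hc0 : ((d0.toNat : Nat) : Int) = d0 := by omega
    have hk1 : ((d1.toNat : Nat) : Int) < n := by omega
    have hc1 : ((d1.toNat : Nat) : Int) = d1 := by omega
    rw [if_pos h1, if_pos h0, modify_map_range n _ _ d0.toNat hk0,
        modify_map_range n _ _ d1.toNat hk1]
    apply List.map_congr_left
    intro c hc
    rw [hc0, hc1]
    by_cases e0 : c = d0 <;> by_cases e1 : c = d1
    · have edd : d0 = d1 := by rw [← e0, ← e1]
      rw [if_pos e1, if_pos e0, hmod, hmod, hz, rowA_explicit, if_pos e0, if_pos e1]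
      simp [edd, List.set]
    · have edd : ¬ d0 = d1 := by rw [← e0]; exact e1
      rw [if_neg e1, if_pos e0, hmod, hz, rowA_explicit, if_pos e0, if_neg e1]
      simp [edd, List.set]
    · rw [if_pos e1, if_neg e0, hmod, hz, rowA_explicit, if_neg e0, if_pos e1]
      simp [List.set]
    · rw [if_neg e1, if_neg e0, hz, rowA_explicit, if_neg e0, if_neg e1]
  · -- only data[0] in range
    have hk0 : ((d0.toNat : Nat) : Int) < n := by omega
    have hc0 : ((d0.toNat : Nat) : Int) = d0 := by omega
    rw [if_neg h1, if_pos h0, modify_map_range n _ _ d0.toNat hk0]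
    apply List.map_congr_left
    intro c hc
    have hcm := (PySem.List.mem_pyRange_one).1 hc
    have e1 : ¬ c = d1 := by rintro rfl; omega
    rw [hc0]
    by_cases e0 : c = d0
    · have edd : ¬ d0 = d1 := by rw [← e0]; exact e1
      rw [if_pos e0, hmod, hz, rowA_explicit, if_pos e0, if_neg e1]
      simp [edd, List.set]
    · rw [if_neg e0, hz, rowA_explicit, if_neg e0, if_neg e1]
  · -- only data[1] in range
    have hk1 : ((d1.toNat : Nat) : Int) < n := by omega
    have hc1 : ((d1.toNat : Nat) : Int) = d1 := by omega
    rw [if_pos h1, if_neg h0, modify_map_range n _ _ d1.toNat hk1]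
    apply List.map_congr_left
    intro c hc
    have hcm := (PySem.List.mem_pyRange_one).1 hc
    have e0 : ¬ c = d0 := by rintro rfl; omega
    rw [hc1]
    by_cases e1 : c = d1
    · rw [if_pos e1, hmod, hz, rowA_explicit, if_neg e0, if_pos e1]
      simp [List.set]
    · rw [if_neg e1, hz, rowA_explicit, if_neg e0, if_neg e1]
  · -- neither in range: nothing to patch
    rw [if_neg h1, if_neg h0]
    apply List.map_congr_left
    intro c hc
    have hcm := (PySem.List.mem_pyRange_one).1 hc
    have e0 : ¬ c = d0 := by rintro rfl; omega
    have e1 : ¬ c = d1 := by rintro rfl; omega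
    rw [hz, rowA_explicit, if_neg e0, if_neg e1]

-- B's patch fold turns every zero template into A's row, chart by chart
theorem foldB_eq (n : Int) :
    ∀ (rest : List (List Int)) (s : Nat) (pre : Int → List (List Int)),
      (∀ c, (pre c).length = s) → (∀ data ∈ rest, 2 ≤ data.length) →
      (PySem.List.enumerate rest (s : Int)).foldl (pvStepB n)
          ((PySem.List.pyRange 0 n 1).map (fun c => pre c ++ rest.map pvZeroRow))
        = (PySem.List.pyRange 0 n 1).map (fun c => pre c ++ rest.map (pvRowA c)) := by
  intro rest
  induction rest with
  | nil => intro s pre _ _; simp [PySem.List.enumerate_nil]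
  | cons data rest ih =>
    intro s pre hpre hlen
    obtain ⟨d0, d1, t, rfl⟩ : ∃ d0 d1 t, data = d0 :: d1 :: t := by
      match data, hlen data (by simp) with
      | d0 :: d1 :: t, _ => exact ⟨d0, d1, t, rfl⟩
    rw [PySem.List.enumerate_cons, List.foldl_cons]
    have hstep := stepB_eq n s pre (fun c => rest.map pvZeroRow) hpre d0 d1 t
    simp only [List.map_cons] at *
    rw [hstep]
    have h2 : ((s : Int)) + 1 = (((s + 1 : Nat)) : Int) := by push_cast; ring
    rw [h2]
    have := ih (s + 1) (fun c => pre c ++ [pvRowA c (d0 :: d1 :: t)])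
      (by intro c; simp [hpre c]) (fun d hd => hlen d (by simp [hd]))
    simp only [List.append_assoc, List.singleton_append] at this
    exact this

-- enumerate of a mapped list
theorem enum_map {α β : Type} (g : α → β) :
    ∀ (l : List α) (s : Int),
      PySem.List.enumerate (l.map g) s = (PySem.List.enumerate l s).map (fun p => (p.1, g p.2)) := by
  intro l
  induction l with
  | nil => intro s; simp [PySem.List.enumerate_nil]
  | cons x xs ih => intro s; simp [PySem.List.enumerate_cons, ih]

-- enumerate of a list built by mapping over an enumeration keeps the indices aligned
theorem enum_enum_map {α β : Type} (g : Int × α → β) :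
    ∀ (l : List α) (s : Int),
      PySem.List.enumerate ((PySem.List.enumerate l s).map g) s
        = (PySem.List.enumerate l s).map (fun p => (p.1, g p)) := by
  intro l
  induction l with
  | nil => intro s; simp [PySem.List.enumerate_nil]
  | cons x xs ih => intro s; simp [PySem.List.enumerate_cons, ih]

-- characterisation of A's fold: each per-class list collects its rows in chart order
theorem fold_char (f : Int → List Int → List Int) :
    ∀ (charts : List (List Int)) (acc : List (List (List Int))),
      charts.foldl (fun a d => (PySem.List.enumerate a).map (fun p => p.2 ++ [f p.1 d])) acc
        = (PySem.List.enumerate acc).map (fun p => p.2 ++ charts.map (f p.1)) := by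
  intro charts
  induction charts with
  | nil => intro acc; simp [PySem.List.map_snd_enumerate]
  | cons d rest ih =>
    intro acc
    simp only [List.foldl_cons, ih]
    rw [enum_enum_map (fun p : Int × List (List Int) => p.2 ++ [f p.1 d]) acc 0]
    simp [List.map_map, Function.comp_def, List.append_assoc]

-- A in class-major normal form
theorem A_norm (n : Int) (charts : List (List Int)) :
    generate_chart n charts
      = (PySem.List.pyRange 0 n 1).map (fun c => charts.map (pvRowA c)) := by
  unfold generate_chart
  rw [fold_char pvRowA charts]
  rw [enum_map (fun _ : Int => ([] : List (List Int))) (PySem.List.pyRange 0 n 1) 0]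
  simp only [List.map_map, Function.comp_def, List.nil_append]
  have h1 : List.map (fun p : Int × Int => charts.map (pvRowA p.1))
      (PySem.List.enumerate (PySem.List.pyRange 0 n 1) 0)
      = List.map (fun c => charts.map (pvRowA c))
          ((PySem.List.enumerate (PySem.List.pyRange 0 n 1) 0).map (fun p => p.1)) := by
    rw [List.map_map]; rfl
  rw [h1, PySem.List.map_fst_enumerate, PySem.List.length_pyRange_one]
  have hRR : PySem.List.pyRange 0 (0 + (((n - 0).toNat : Nat) : Int)) 1 = PySem.List.pyRange 0 n 1 := by
    by_cases hn : 0 ≤ n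
    · rw [Int.sub_zero, Int.toNat_of_nonneg hn, Int.zero_add]
    · rw [PySem.List.pyRange_one_eq_nil (by omega), PySem.List.pyRange_one_eq_nil (by omega)]
  rw [hRR]

-- ===== VERDICT (by name: the statement is the Claim_ definition above) =====
theorem generate_chart_spec : Claim_equal_generate_chart := by
  intro n charts _ hpre
  unfold Spec_generate_chart
  rw [A_norm]
  unfold generate_chart_alt
  by_cases hn : n ≤ 0
  · rw [if_pos hn, PySem.List.pyRange_one_eq_nil (by omega)]
    simp
  · rw [if_neg hn]
    have := foldB_eq n charts 0 (fun _ => []) (fun _ => rfl) (hpre (by omega))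
    simp only [List.nil_append, Int.natCast_zero] at this
    rw [this]
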